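-- pv_equiv track=rewrite | github.com/mariandamblena/matrices | 5.py | butacas_contiguas
-- ===== SOURCE A (Python) =====
-- def butacas_contiguas(sala):
--     max_contiguas = 0
--     inicio_contiguas = (-1, -1)  # Coordenadas de inicio de la secuencia más larga
--
--     for i, fila in enumerate(sala):
--         contiguas = 0
--         inicio_temp = -1
--         for j, butaca in enumerate(fila):
--             if not butaca:  # Si la butaca está libre
--                 if contiguas == 0:
--                     inicio_temp = j
--                 contiguas += 1
--             else:
--                 if contiguas > max_contiguas:
--                     max_contiguas = contiguas
--                     inicio_contiguas = (i, inicio_temp)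
--                 contiguas = 0
--
--         # Revisar al final de la fila si la secuencia más larga es al final
--         if contiguas > max_contiguas:
--             max_contiguas = contiguas
--             inicio_contiguas = (i, inicio_temp)
--
--     return inicio_contiguas, max_contiguas
-- ===== SOURCE B (Python) =====
-- def _runs(fila):
--     """Maximal runs of free (False) seats as (start_col, length), left to right."""
--     runs = []
--     n = len(fila)
--     j = 0
--     while j < n:
--         if fila[j]:
--             j += 1
--         else:
--             k = j
--             while k < n and not fila[k]:
--                 k += 1
--             runs.append((j, k - j))
--             j = k
--     return runs
--
-- def butacas_contiguas(sala):
--     best = ((-1, -1), 0)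
--     for i, fila in enumerate(sala):
--         for j, largo in _runs(fila):
--             if largo > best[1]:
--                 best = ((i, j), largo)
--     return best
-- ===== Notes on version B (the rewrite author's own statement) =====
-- stated objective: alternative
-- what changed: A's single stateful scan carrying a live run counter and tentative start across each row is replaced by a two-phase decomposition: a helper first extracts each row's maximal free runs as (start_col, length) records, then a separate selection pass keeps the strictly longest run seen in top-to-bottom, left-to-right order.
import Mathlib
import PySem

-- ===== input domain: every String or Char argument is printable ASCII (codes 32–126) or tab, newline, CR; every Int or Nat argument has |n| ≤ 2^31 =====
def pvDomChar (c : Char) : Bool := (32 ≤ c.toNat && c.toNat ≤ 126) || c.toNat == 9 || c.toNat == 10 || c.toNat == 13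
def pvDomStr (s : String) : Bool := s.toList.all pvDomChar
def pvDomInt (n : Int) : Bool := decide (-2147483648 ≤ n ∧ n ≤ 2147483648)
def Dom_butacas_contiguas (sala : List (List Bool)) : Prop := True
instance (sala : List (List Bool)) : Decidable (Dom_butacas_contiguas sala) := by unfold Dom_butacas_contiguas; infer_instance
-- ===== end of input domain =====

-- B re-implements A by a different decomposition: per-row extraction of maximal free runs
-- followed by a separate selection pass (objective: alternative/simpler; same O(rows·cols) cost).

-- ===== PORT A =====
-- inner-loop body of A; state = ((inicio_contiguas, max_contiguas), (contiguas, inicio_temp))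
def Ainner (i : Int) (s : ((Int × Int) × Int) × (Int × Int)) (q : Int × Bool) :
    ((Int × Int) × Int) × (Int × Int) :=
  if !q.2 then
    (s.1, (s.2.1 + 1, if s.2.1 == 0 then q.1 else s.2.2))
  else
    (if s.2.1 > s.1.2 then ((i, s.2.2), s.2.1) else s.1, (0, s.2.2))

-- outer-loop body of A: run the inner loop over the row, then the end-of-row check
def Arow (st : (Int × Int) × Int) (p : Int × List Bool) : (Int × Int) × Int :=
  let r := (PySem.List.enumerate p.2 0).foldl (Ainner p.1) (st, (0, -1))
  if r.2.1 > r.1.2 then ((p.1, r.2.2), r.2.1) else r.1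

def butacas_contiguas (sala : List (List Bool)) : (Int × Int) × Int :=
  (PySem.List.enumerate sala 0).foldl Arow ((-1, -1), 0)

-- ===== PORT B =====
-- _runs: maximal runs of free (false) seats as (start_col, length); the inner Python
-- while-loop that advances k over the free block is ported as takeWhile/drop, exact.
def pyRuns : List Bool → Int → List (Int × Int)
  | [], _ => []
  | true :: rest, j => pyRuns rest (j + 1)
  | false :: rest, j =>
      let k := (rest.takeWhile (fun b => !b)).length
      (j, (k : Int) + 1) :: pyRuns (rest.drop k) (j + (k : Int) + 1)
  termination_by fila _ => fila.length

-- selection step: keep the strictly longer run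
def Bsel (i : Int) (b : (Int × Int) × Int) (r : Int × Int) : (Int × Int) × Int :=
  if r.2 > b.2 then ((i, r.1), r.2) else b

def butacas_contiguas_alt (sala : List (List Bool)) : (Int × Int) × Int :=
  (PySem.List.enumerate sala 0).foldl
    (fun best p => (pyRuns p.2 0).foldl (Bsel p.1) best) ((-1, -1), 0)

-- ===== PRECONDITION & SPEC =====
def Spec_butacas_contiguas (sala : List (List Bool)) (out : (Int × Int) × Int) : Prop := out = butacas_contiguas_alt sala
instance (sala : List (List Bool)) (out : (Int × Int) × Int) : Decidable (Spec_butacas_contiguas sala out) := by unfold Spec_butacas_contiguas; infer_instance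

-- ===== CLAIM (what is proved, stated in full; the proofs are below) =====
def Claim_equal_butacas_contiguas : Prop := ∀ (sala : List (List Bool)), Dom_butacas_contiguas sala → Spec_butacas_contiguas sala (butacas_contiguas sala)

-- ===== LEMMAS AND PROOFS =====

set_option maxRecDepth 4000

-- unfolding equations for pyRuns (well-founded recursion)
theorem pyRuns_nil (j : Int) : pyRuns [] j = [] := by simp [pyRuns]

theorem pyRuns_true (rest : List Bool) (j : Int) :
    pyRuns (true :: rest) j = pyRuns rest (j + 1) := by simp [pyRuns]

theorem pyRuns_false (rest : List Bool) (j : Int) :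
    pyRuns (false :: rest) j =
      (j, ((rest.takeWhile (fun b => !b)).length : Int) + 1) ::
        pyRuns (rest.drop (rest.takeWhile (fun b => !b)).length)
          (j + ((rest.takeWhile (fun b => !b)).length : Int) + 1) := by
  simp [pyRuns]

-- drop past the takeWhile prefix = dropWhile
theorem drop_len_takeWhile (p : Bool → Bool) (l : List Bool) :
    l.drop (l.takeWhile p).length = l.dropWhile p := by
  induction l with
  | nil => simp
  | cons a t ih => by_cases h : p a <;> simp [h, ih]

-- A's inner loop over a block of free seats just counts, keeping inicio_temp
theorem falses_fold (blk : List Bool) (hblk : ∀ b ∈ blk, b = false) :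
    ∀ (i j c itemp : Int) (s : (Int × Int) × Int), 0 < c →
      (PySem.List.enumerate blk j).foldl (Ainner i) (s, (c, itemp))
        = (s, (c + blk.length, itemp)) := by
  induction blk with
  | nil => intro i j c itemp s hc; simp
  | cons b t ih =>
      intro i j c itemp s hc
      have hb : b = false := hblk b (by simp)
      subst hb
      rw [PySem.List.enumerate_cons, List.foldl_cons]
      have hc0 : (c == 0) = false := by simp; omega
      have hstep : Ainner i (s, (c, itemp)) (j, false) = (s, (c + 1, itemp)) := by
        simp [Ainner, hc0]
      rw [hstep, ih (fun b hb => hblk b (by simp [hb])) i (j+1) (c+1) itemp s (by omega)]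
      have hcast : c + 1 + ((t.length : Int)) = c + (((t.length + 1 : Nat) : Int)) := by
        push_cast; ring
      simp [hcast]

-- per-row equivalence: A's inner loop + end-of-row check = fold of Bsel over pyRuns
theorem row_eq (fila : List Bool) (j : Int) :
    ∀ (i itemp : Int) (s : (Int × Int) × Int), 0 ≤ s.2 →
      (let r := (PySem.List.enumerate fila j).foldl (Ainner i) (s, (0, itemp));
       if r.2.1 > r.1.2 then ((i, r.2.2), r.2.1) else r.1)
        = (pyRuns fila j).foldl (Bsel i) s := by
  induction fila, j using pyRuns.induct with
  | case1 j =>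
      intro i itemp s hs
      simp only [PySem.List.enumerate_nil, List.foldl_nil, pyRuns_nil]
      have : ¬ ((0:Int) > s.2) := by omega
      simp [this]
  | case2 rest j ih =>
      intro i itemp s hs
      rw [PySem.List.enumerate_cons, List.foldl_cons, pyRuns_true]
      have h1 : Ainner i (s, (0, itemp)) (j, true) = (s, (0, itemp)) := by
        have : ¬ ((0:Int) > s.2) := by omega
        simp [Ainner, this]
      rw [h1]
      exact ih i itemp s hs
  | case3 rest j k ih =>
      intro i itemp s hs
      have hk : (rest.takeWhile (fun b => !b)).length = k := rfl
      have hsplit : rest = rest.takeWhile (fun b => !b) ++ rest.drop k := by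
        rw [show k = (rest.takeWhile (fun b => !b)).length from rfl,
            drop_len_takeWhile, List.takeWhile_append_dropWhile]
      have hdw : rest.drop k = rest.dropWhile (fun b => !b) := by
        rw [show k = (rest.takeWhile (fun b => !b)).length from rfl, drop_len_takeWhile]
      rw [PySem.List.enumerate_cons, List.foldl_cons]
      have h1 : Ainner i (s, (0, itemp)) (j, false) = (s, (1, j)) := by
        simp [Ainner]
      rw [h1]
      conv_lhs => rw [hsplit]
      rw [PySem.List.enumerate_append, List.foldl_append]
      have hall : ∀ b ∈ rest.takeWhile (fun b => !b), b = false := by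
        intro b hb
        simpa using List.mem_takeWhile_imp hb
      rw [falses_fold _ hall i _ 1 j s (by omega), hk, pyRuns_false, hk]
      cases hys : rest.drop k with
      | nil =>
          have hc : (1:Int) + (k:Int) = (k:Int) + 1 := by ring
          rw [hys] at *
          simp only [PySem.List.enumerate_nil, List.foldl_nil, pyRuns_nil,
            List.foldl_cons, List.foldl_nil, hc]
          simp [Bsel]
      | cons y ys =>
          have hy : y = true := by
            have hne : rest.dropWhile (fun b => !b) ≠ [] := by
              rw [← hdw, hys]; simp
            have hys2 : rest.dropWhile (fun b => !b) = y :: ys := by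
              rw [← hdw, hys]
            have hnot := List.head_dropWhile_not (fun b => !b) hne
            have hhead : (rest.dropWhile (fun b => !b)).head hne = y := by
              simp [hys2]
            rw [hhead] at hnot
            cases y
            · simp at hnot
            · rfl
          subst hy
          rw [PySem.List.enumerate_cons, List.foldl_cons]
          have h2 : Ainner i (s, (1 + (k:Int), j)) (j + 1 + (k:Int), true)
              = (Bsel i s (j, (k:Int) + 1), (0, j)) := by
            by_cases hgt : (1 + (k:Int)) > s.2
            · have h' : ((k:Int) + 1) > s.2 := by omega
              simp [Ainner, Bsel, hgt, h']
              omega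
            · have h' : ¬ (((k:Int) + 1) > s.2) := by omega
              simp [Ainner, Bsel, hgt, h']
          rw [h2]
          have hs' : 0 ≤ (Bsel i s (j, (k:Int) + 1)).2 := by
            simp only [Bsel]; split
            · simp; omega
            · exact hs
          have ihy := ih i j (Bsel i s (j, (k:Int) + 1)) hs'
          rw [hys, PySem.List.enumerate_cons, List.foldl_cons, pyRuns_true] at ihy
          have hstep : Ainner i (Bsel i s (j, (k:Int) + 1), (0, j)) (j + (k:Int) + 1, true)
              = (Bsel i s (j, (k:Int) + 1), (0, j)) := by
            have h0 : ¬ ((0:Int) > (Bsel i s (j, (k:Int) + 1)).2) := by omega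
            simp [Ainner, h0]
          rw [hstep] at ihy
          rw [List.foldl_cons, pyRuns_true]
          have harith : j + 1 + (k:Int) + 1 = j + (k:Int) + 1 + 1 := by ring
          rw [harith]
          exact ihy

-- Bsel's fold keeps the best length nonnegative
theorem bfold_nonneg (rs : List (Int × Int)) (i : Int) :
    ∀ (b : (Int × Int) × Int), 0 ≤ b.2 → 0 ≤ ((rs.foldl (Bsel i) b)).2 := by
  induction rs with
  | nil => intro b hb; simpa
  | cons r t ih =>
      intro b hb
      rw [List.foldl_cons]
      apply ih
      simp only [Bsel]; split <;> omega

-- whole-grid equivalence, generalized over starting row index and accumulated best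
theorem grid_eq (sala : List (List Bool)) :
    ∀ (i0 : Int) (st : (Int × Int) × Int), 0 ≤ st.2 →
      (PySem.List.enumerate sala i0).foldl Arow st
        = (PySem.List.enumerate sala i0).foldl
            (fun best p => (pyRuns p.2 0).foldl (Bsel p.1) best) st := by
  induction sala with
  | nil => intro i0 st hst; simp
  | cons fila rest ih =>
      intro i0 st hst
      rw [PySem.List.enumerate_cons, List.foldl_cons, List.foldl_cons]
      have hrow : Arow st (i0, fila) = (pyRuns fila 0).foldl (Bsel i0) st := by
        simpa [Arow] using row_eq fila 0 i0 (-1) st hst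
      rw [hrow]
      exact ih (i0 + 1) _ (bfold_nonneg _ _ st hst)

-- ===== VERDICT (by name: the statement is the Claim_ definition above) =====
theorem butacas_contiguas_spec : Claim_equal_butacas_contiguas := by
  intro sala _
  unfold Spec_butacas_contiguas butacas_contiguas butacas_contiguas_alt
  exact grid_eq sala 0 ((-1, -1), 0) (by norm_num)
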